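-- pv_equiv track=rewrite | github.com/CarePlay34/NSI | ManuelPage74Exo12.py | longueur_mots_no_split_alternative
-- ===== SOURCE A (Python) =====
-- def longueur_mots_no_split_alternative(phrase):
--     longueurs = []
--     i = 0
--     n = len(phrase)
--
--     while i < n:
--         # Passer les espaces (si on en a) pour trouver le début du mot.
--         while i < n and phrase[i] == ' ':
--             i += 1
--
--         # Si on a atteint la fin de la chaîne, on s'arrête.
--         if i >= n:
--             break
--
--         # Début du mot.
--         debut = i
--
--         # Avancer jusqu'au prochain espace ou la fin de la chaîne.
--         while i < n and phrase[i] != ' ':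
--             i += 1
--
--         # La fin du mot se situe à l'indice i (non inclus).
--         fin = i
--
--         # Calcul de la longueur du mot.
--         longueur = fin - debut
--         longueurs.append(longueur)
--
--     return longueurs
-- ===== SOURCE B (Python) =====
-- def longueur_mots_no_split_alternative(phrase):
--     return [len(mot) for mot in phrase.split(' ') if mot]
-- ===== Notes on version B (the rewrite author's own statement) =====
-- stated objective: idiomatic
-- what changed: Replaces the manual index-scanning state machine (nested while loops with start/end pointers) by tokenizing the phrase with str.split on a single-space separator and mapping len over the non-empty tokens.
import Mathlib
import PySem

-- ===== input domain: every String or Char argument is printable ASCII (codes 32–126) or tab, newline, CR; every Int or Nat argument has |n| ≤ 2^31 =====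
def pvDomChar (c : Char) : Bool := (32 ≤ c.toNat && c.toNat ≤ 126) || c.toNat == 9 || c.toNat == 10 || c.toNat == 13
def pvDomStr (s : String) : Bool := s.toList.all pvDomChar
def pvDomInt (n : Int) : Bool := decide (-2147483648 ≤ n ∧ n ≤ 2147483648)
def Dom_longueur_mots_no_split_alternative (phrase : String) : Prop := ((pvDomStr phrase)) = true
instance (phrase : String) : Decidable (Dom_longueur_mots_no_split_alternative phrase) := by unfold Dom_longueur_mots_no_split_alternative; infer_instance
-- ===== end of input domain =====

-- B replaces A's index-scanning state machine by tokenize-with-split(' ') then map len over non-empty tokens (idiomatic).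

-- ===== PORT A =====
-- A scans with an index i over phrase; the port runs the same scan on the suffix of
-- characters not yet visited: pvSkipA is the inner "skip spaces" while-loop, pvWordA the
-- inner "advance to next space" while-loop (returning fin - debut and the remaining suffix).

-- while i < n and phrase[i] == ' ': i += 1
def pvSkipA : List Char → List Char
  | [] => []
  | c :: r => if c = ' ' then pvSkipA r else c :: r

-- debut = i; while i < n and phrase[i] != ' ': i += 1; returns (fin - debut, suffix from fin)
def pvWordA : List Char → Nat × List Char
  | [] => (0, [])
  | c :: r => if c = ' ' then (0, c :: r) else ((pvWordA r).1 + 1, (pvWordA r).2)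

theorem pvSkipA_length_le (l : List Char) : (pvSkipA l).length ≤ l.length := by
  induction l with
  | nil => simp [pvSkipA]
  | cons c r ih => simp only [pvSkipA]; split <;> simp <;> omega

theorem pvWordA_length_le (l : List Char) : (pvWordA l).2.length ≤ l.length := by
  induction l with
  | nil => simp [pvWordA]
  | cons c r ih => simp only [pvWordA]; split <;> simp <;> omega

theorem pvSkipA_head_ne (l : List Char) {c : Char} {r : List Char}
    (h : pvSkipA l = c :: r) : c ≠ ' ' := by
  induction l with
  | nil => simp [pvSkipA] at h
  | cons d t ih =>
    simp only [pvSkipA] at h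
    split at h
    · exact ih h
    · rename_i hd; cases h; exact fun hc => hd (by simp [hc])

-- outer while loop of A: skip spaces; if at end, break; else measure a word and continue
def pvLoopA (l : List Char) : List Int :=
  match h : pvSkipA l with
  | [] => []
  | c :: r =>
    (((pvWordA (c :: r)).1 : Int)) :: pvLoopA (pvWordA (c :: r)).2
termination_by l.length
decreasing_by
  have h1 : (pvSkipA l).length ≤ l.length := pvSkipA_length_le l
  have h2 := pvSkipA_head_ne l h
  have h3 : (pvWordA (c :: r)).2.length ≤ r.length := by
    simp only [pvWordA, if_neg h2]
    exact pvWordA_length_le r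
  rw [h] at h1
  simp at h1
  omega

def longueur_mots_no_split_alternative (phrase : String) : List Int :=
  pvLoopA phrase.toList

-- ===== PORT B =====
-- [len(mot) for mot in phrase.split(' ') if mot]
def longueur_mots_no_split_alternative_alt (phrase : String) : List Int :=
  ((PySem.Chars.splitOn phrase.toList [' ']).filter (fun mot => !mot.isEmpty)).map
    (fun mot => (PySem.Chars.len mot : Int))

-- ===== PRECONDITION & SPEC =====
def Spec_longueur_mots_no_split_alternative (phrase : String) (out : List Int) : Prop := out = longueur_mots_no_split_alternative_alt phrase
instance (phrase : String) (out : List Int) : Decidable (Spec_longueur_mots_no_split_alternative phrase out) := by unfold Spec_longueur_mots_no_split_alternative; infer_instance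

-- ===== CLAIM (what is proved, stated in full; the proofs are below) =====
def Claim_equal_longueur_mots_no_split_alternative : Prop := ∀ (phrase : String), Dom_longueur_mots_no_split_alternative phrase → Spec_longueur_mots_no_split_alternative phrase (longueur_mots_no_split_alternative phrase)

-- ===== LEMMAS AND PROOFS =====

-- a simple structural model of str.split(' ') used only by the proofs
def pvSp : List Char → List (List Char)
  | [] => [[]]
  | c :: r =>
    if c = ' ' then [] :: pvSp r
    else
      match pvSp r with
      | [] => [[c]]
      | w :: ws => (c :: w) :: ws

theorem pvSp_ne_nil (l : List Char) : pvSp l ≠ [] := by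
  cases l with
  | nil => simp [pvSp]
  | cons c r =>
    simp only [pvSp]
    split
    · simp
    · cases h : pvSp r <;> simp

theorem pvGo_spec (fuel : Nat) (l cur : List Char) (acc : List (List Char))
    (hf : l.length < fuel) :
    PySem.Chars.splitOn.go [' '] fuel l cur acc
      = acc.reverse ++ (cur.reverse ++ (pvSp l).headI) :: (pvSp l).tail := by
  induction fuel generalizing l cur acc with
  | zero => omega
  | succ f ih =>
    cases l with
    | nil =>
      simp [PySem.Chars.splitOn.go, pvSp]
    | cons c rest =>
      obtain ⟨w, ws, hw⟩ : ∃ w ws, pvSp rest = w :: ws := by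
        cases h : pvSp rest with
        | nil => exact absurd h (pvSp_ne_nil rest)
        | cons w ws => exact ⟨w, ws, rfl⟩
      by_cases hc : c = ' '
      · subst hc
        rw [show PySem.Chars.splitOn.go [' '] (f + 1) (' ' :: rest) cur acc
              = PySem.Chars.splitOn.go [' '] f rest [] (cur.reverse :: acc) by
            simp [PySem.Chars.splitOn.go, List.isPrefixOf]]
        rw [ih rest [] (cur.reverse :: acc) (by simp at hf ⊢; omega)]
        simp [pvSp, hw]
      · rw [show PySem.Chars.splitOn.go [' '] (f + 1) (c :: rest) cur acc
              = PySem.Chars.splitOn.go [' '] f rest (c :: cur) acc by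
            simp [PySem.Chars.splitOn.go, List.isPrefixOf, hc]
            intro h; exact absurd h.symm hc]
        rw [ih rest (c :: cur) acc (by simp at hf ⊢; omega)]
        simp [pvSp, hc, hw]
  termination_by fuel

theorem pvSplitOn_eq_sp (l : List Char) : PySem.Chars.splitOn l [' '] = pvSp l := by
  unfold PySem.Chars.splitOn
  rw [pvGo_spec (l.length + 1) l [] [] (by omega)]
  obtain ⟨w, ws, hw⟩ : ∃ w ws, pvSp l = w :: ws := by
    cases h : pvSp l with
    | nil => exact absurd h (pvSp_ne_nil l)
    | cons w ws => exact ⟨w, ws, rfl⟩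
  simp [hw]

-- measured lengths of the non-empty tokens
def pvLens (l : List Char) : List Int :=
  ((pvSp l).filter (fun w => !w.isEmpty)).map (fun w => (w.length : Int))

theorem pvLens_skip (l : List Char) : pvLens (pvSkipA l) = pvLens l := by
  induction l with
  | nil => rfl
  | cons c r ih =>
    simp only [pvSkipA]
    by_cases hc : c = ' '
    · rw [if_pos hc, ih]
      simp [pvLens, pvSp, hc]
    · rw [if_neg hc]

theorem pvLens_word (l : List Char) (c : Char) (hc : c ≠ ' ') :
    pvLens (c :: l) = ((pvWordA (c :: l)).1 : Int) :: pvLens (pvWordA (c :: l)).2 := by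
  induction l generalizing c with
  | nil =>
    simp [pvLens, pvSp, pvWordA, hc]
  | cons d r ih =>
    by_cases hd : d = ' '
    · subst hd
      simp [pvLens, pvSp, pvWordA, hc]
    · obtain ⟨w, ws, hw⟩ : ∃ w ws, pvSp r = w :: ws := by
        cases h : pvSp r with
        | nil => exact absurd h (pvSp_ne_nil r)
        | cons w ws => exact ⟨w, ws, rfl⟩
      have hih := ih d hd
      simp [pvLens, pvSp, pvWordA, hd, hc, hw] at hih ⊢
      exact hih

theorem pvLens_all_spaces (l : List Char) (h : pvSkipA l = []) : pvLens l = [] := by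
  induction l with
  | nil => rfl
  | cons c r ih =>
    simp only [pvSkipA] at h
    by_cases hc : c = ' '
    · rw [if_pos hc] at h
      simp [pvLens, pvSp, hc]
      have := ih h
      simpa [pvLens] using this
    · rw [if_neg hc] at h; cases h

theorem pvLoopA_eq_lens (l : List Char) : pvLoopA l = pvLens l := by
  induction hn : l.length using Nat.strong_induction_on generalizing l with
  | _ n ih =>
    rw [pvLoopA]
    split
    · next h => exact (pvLens_all_spaces l h).symm
    · next c r h =>
      have hc := pvSkipA_head_ne l h
      have hlen : (pvWordA (c :: r)).2.length < l.length := by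
        have h1 : (pvSkipA l).length ≤ l.length := pvSkipA_length_le l
        have h3 : (pvWordA (c :: r)).2.length ≤ r.length := by
          simp only [pvWordA, if_neg hc]
          exact pvWordA_length_le r
        rw [h] at h1; simp at h1; omega
      rw [ih (pvWordA (c :: r)).2.length (by omega) _ rfl]
      rw [← pvLens_skip l, h, pvLens_word r c hc]

theorem pvMain (l : List Char) :
    pvLoopA l = ((PySem.Chars.splitOn l [' ']).filter (fun mot => !mot.isEmpty)).map
      (fun mot => (PySem.Chars.len mot : Int)) := by
  rw [pvSplitOn_eq_sp, pvLoopA_eq_lens]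
  simp [pvLens, PySem.Chars.len_eq]

-- ===== VERDICT (by name: the statement is the Claim_ definition above) =====
theorem longueur_mots_no_split_alternative_spec : Claim_equal_longueur_mots_no_split_alternative := by
  intro phrase _
  unfold Spec_longueur_mots_no_split_alternative longueur_mots_no_split_alternative longueur_mots_no_split_alternative_alt
  exact pvMain phrase.toList
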